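-- pv_equiv track=rewrite | github.com/StanChung624/do-mah-jong | CheckUtility.py | check_txt
-- ===== SOURCE A (Python) =====
-- from typing import Dict, List, Tuple
--
-- def check_txt(no_pair:List[str])->Tuple[List[str], Dict[str,int]]:
--     """
--         check for text card in holdings (pair removed already)
--         and return with only numeric cards, and map of text
--         ex: given o1, o2, o3, o4, o4, o4, N, N, N, S, S
--         return: [o1, o2. o3, o4, o4, o4] and {N:3, S:2}
--     """
--     txt_map = dict(E=0, S=0, W=0, N=0, Ch=0, Fa=0, By=0)
--     ret = list()
--     for card in no_pair:
--         if card in txt_map.keys():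
--             txt_map[card] += 1
--         else:
--             ret.append(card)
--
--     for card, count in txt_map.items():
--         if count < 3:
--             return ret, None
--     return ret, txt_map
-- ===== SOURCE B (Python) =====
-- def check_txt(no_pair):
--     keys = ['E', 'S', 'W', 'N', 'Ch', 'Fa', 'By']
--
--     def solve(seg):
--         # divide & conquer: returns (numeric cards of seg, per-key counts of seg)
--         if not seg:
--             return [], [0] * 7
--         if len(seg) == 1:
--             c = seg[0]
--             if c in keys:
--                 return [], [1 if k == c else 0 for k in keys]
--             return [c], [0] * 7
--         mid = len(seg) // 2
--         r1, c1 = solve(seg[:mid])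
--         r2, c2 = solve(seg[mid:])
--         return r1 + r2, [x + y for x, y in zip(c1, c2)]
--
--     ret, counts = solve(no_pair)
--     if min(counts) >= 3:
--         return ret, dict(zip(keys, counts))
--     return ret, None
-- ===== Notes on version B (the rewrite author's own statement) =====
-- stated objective: alternative
-- what changed: B replaces A's single accumulating left-to-right pass over a mutable count-dict by a divide-and-conquer recursion that splits the hand in halves, merges the numeric-card lists by concatenation and the seven per-key counts element-wise, then validates with min(counts) >= 3.
import Mathlib
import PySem

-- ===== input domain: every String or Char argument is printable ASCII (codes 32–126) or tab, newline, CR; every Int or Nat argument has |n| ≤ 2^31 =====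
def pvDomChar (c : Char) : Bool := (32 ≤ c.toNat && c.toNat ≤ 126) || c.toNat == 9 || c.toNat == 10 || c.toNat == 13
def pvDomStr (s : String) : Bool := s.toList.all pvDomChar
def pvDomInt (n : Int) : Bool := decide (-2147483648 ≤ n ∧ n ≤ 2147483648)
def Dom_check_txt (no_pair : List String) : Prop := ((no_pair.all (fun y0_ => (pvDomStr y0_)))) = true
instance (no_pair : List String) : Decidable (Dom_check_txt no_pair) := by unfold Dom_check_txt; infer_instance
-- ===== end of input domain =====

-- B replaces A's single accumulating pass over a mutable count-dict by a
-- divide-and-conquer recursion merging half-results (objective: alternative).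

-- ===== PORT A =====
-- txt_map = dict(E=0, S=0, W=0, N=0, Ch=0, Fa=0, By=0)
def pvTxtMap0 : PySem.Dict String Int :=
  ((((((PySem.Dict.empty.insert "E" 0).insert "S" 0).insert "W" 0).insert "N" 0).insert
      "Ch" 0).insert "Fa" 0).insert "By" 0

-- the body of A's first loop: count a text card, or append a numeric one to ret
def pvStepA (st : PySem.Dict String Int × List String) (card : String) :
    PySem.Dict String Int × List String :=
  if st.1.keys.contains card then (st.1.modify card 0 (· + 1), st.2)
  else (st.1, st.2 ++ [card])

-- A's second loop: walk txt_map.items(); an early 'return ret, None' on any count < 3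
def pvValidateA (ret : List String) (full : List (String × Int)) :
    List (String × Int) → List String × Option (List (String × Int))
  | [] => (ret, some full)
  | (_, count) :: rest =>
      if count < 3 then (ret, none) else pvValidateA ret full rest

def check_txt (no_pair : List String) : List String × (Option (List (String × Int))) :=
  let st := no_pair.foldl pvStepA (pvTxtMap0, [])
  pvValidateA st.2 st.1.items st.1.items

-- ===== PORT B =====
def pvKeys : List String := ["E", "S", "W", "N", "Ch", "Fa", "By"]

-- B's divide-and-conquer helper 'solve': numeric cards and the 7 per-key counts of a segment
def pvSolve (seg : List String) : List String × List Int :=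
  if h : seg.isEmpty then ([], List.replicate 7 0)
  else if h1 : seg.length = 1 then
    let c := seg.headD ""
    if pvKeys.contains c then ([], pvKeys.map (fun k => if k = c then (1 : Int) else 0))
    else ([c], List.replicate 7 0)
  else
    let mid := seg.length / 2
    let p1 := pvSolve (seg.take mid)
    let p2 := pvSolve (seg.drop mid)
    (p1.1 ++ p2.1, List.zipWith (· + ·) p1.2 p2.2)
termination_by seg.length
decreasing_by
  all_goals
    have hne : seg ≠ [] := by simpa [List.isEmpty_iff] using h
    have hpos : 0 < seg.length := List.length_pos_of_ne_nil hne
    simp [List.length_take]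
    omega

-- min(counts) >= 3 ? dict(zip(keys, counts)) : None
-- (the 'none' branch of min? is unreachable: counts always has the 7 entries)
def check_txt_alt (no_pair : List String) : List String × (Option (List (String × Int))) :=
  let p := pvSolve no_pair
  match PySem.List.min? p.2 (fun x => x) with
  | some m =>
      if 3 ≤ m then
        (p.1, some ((List.zip pvKeys p.2).foldl
                  (fun d q => d.insert q.1 q.2) PySem.Dict.empty).items)
      else (p.1, none)
  | none => (p.1, none)

-- ===== PRECONDITION & SPEC =====
def Spec_check_txt (no_pair : List String) (out : List String × (Option (List (String × Int)))) : Prop := out = check_txt_alt no_pair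
instance (no_pair : List String) (out : List String × (Option (List (String × Int)))) : Decidable (Spec_check_txt no_pair out) := by unfold Spec_check_txt; infer_instance

-- ===== CLAIM (what is proved, stated in full; the proofs are below) =====
def Claim_equal_check_txt : Prop := ∀ (no_pair : List String), Dom_check_txt no_pair → Spec_check_txt no_pair (check_txt no_pair)

-- ===== LEMMAS AND PROOFS =====

-- invariant of A's first loop
theorem pv_fold_inv (l : List String) (d : PySem.Dict String Int) (acc : List String)
    (hk : d.keys = pvKeys) :
    (l.foldl pvStepA (d, acc)).1.keys = pvKeys ∧
    (∀ k ∈ pvKeys, (l.foldl pvStepA (d, acc)).1.getD k 0 = d.getD k 0 + List.count k l) ∧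
    (l.foldl pvStepA (d, acc)).2 = acc ++ l.filter (fun c => !(pvKeys.contains c)) := by
  induction l generalizing d acc with
  | nil => simp [hk]
  | cons c rest ih =>
    by_cases hc : c ∈ pvKeys
    · have hdcont : d.contains c = true := by
        rw [PySem.Dict.contains_iff_mem_keys, hk]; exact hc
      have hkeys' : (d.modify c 0 (· + 1)).keys = pvKeys := by
        rw [PySem.Dict.keys_modify, PySem.Dict.keys_insert_of_contains _ _ hdcont, hk]
      have step : List.foldl pvStepA (d, acc) (c :: rest)
          = List.foldl pvStepA (d.modify c 0 (· + 1), acc) rest := by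
        simp [pvStepA, hk, hc]
      obtain ⟨h1, h2, h3⟩ := ih (d.modify c 0 (· + 1)) acc hkeys'
      refine ⟨by rw [step]; exact h1, ?_, ?_⟩
      · intro k hkmem
        rw [step, h2 k hkmem, PySem.Dict.getD_modify]
        by_cases hkc : k = c
        · subst hkc; simp; ring
        · simp [hkc, Ne.symm hkc]
      · rw [step, h3]; simp [hc]
    · have step : List.foldl pvStepA (d, acc) (c :: rest)
          = List.foldl pvStepA (d, acc ++ [c]) rest := by
        simp [pvStepA, hk, hc]
      obtain ⟨h1, h2, h3⟩ := ih d (acc ++ [c]) hk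
      refine ⟨by rw [step]; exact h1, ?_, ?_⟩
      · intro k hkmem
        rw [step, h2 k hkmem, List.count_cons]
        have : ¬ (c = k) := fun h => hc (h ▸ hkmem)
        simp [this]
      · rw [step, h3]; simp [hc]

-- the final dict's items, in closed form
theorem pv_items_eq (no_pair : List String) :
    (no_pair.foldl pvStepA (pvTxtMap0, [])).1.items
      = pvKeys.map (fun k => (k, (List.count k no_pair : Int))) := by
  obtain ⟨h1, h2, _⟩ := pv_fold_inv no_pair pvTxtMap0 [] (by decide)
  have hnd : (no_pair.foldl pvStepA (pvTxtMap0, [])).1.keys.Nodup := by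
    rw [h1]; decide
  rw [PySem.Dict.items_eq_map_keys _ hnd (0 : Int), h1]
  apply List.map_congr_left
  intro k hkmem
  have hz : pvTxtMap0.getD k 0 = 0 := by fin_cases hkmem <;> decide
  rw [h2 k hkmem, hz]
  simp

-- A's early-return validation as an all(...) test
theorem pv_validate_eq (ret : List String) (items : List (String × Int)) (full : List (String × Int)) :
    pvValidateA ret full items
      = if items.all (fun p => 3 ≤ p.2) then (ret, some full) else (ret, none) := by
  induction items with
  | nil => simp [pvValidateA]
  | cons p rest ih =>
    obtain ⟨c, n⟩ := p
    by_cases hn : n < 3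
    · simp [pvValidateA, hn, show ¬ (3 ≤ n) by omega]
    · have h3n : decide ((3:Int) ≤ n) = true := by simpa using (by omega : (3:Int) ≤ n)
      simp only [pvValidateA, if_neg hn, ih, List.all_cons, h3n, Bool.true_and]

-- zipWith (+) of two maps over the same key list is the map of the sums
theorem pv_zipWith_map (f g : String → Int) (l : List String) :
    List.zipWith (· + ·) (l.map f) (l.map g) = l.map (fun k => f k + g k) := by
  induction l with
  | nil => rfl
  | cons x t ih => simp [ih]

-- the divide-and-conquer helper computes the filter and the per-key counts
theorem pvSolve_eq (seg : List String) :
    pvSolve seg = (seg.filter (fun c => !(pvKeys.contains c)),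
                   pvKeys.map (fun k => (List.count k seg : Int))) := by
  induction seg using pvSolve.induct with
  | case1 seg h =>
    have : seg = [] := List.isEmpty_iff.mp h
    subst this
    rw [pvSolve]
    simp
    decide
  | case2 seg h h1 c hmem =>
    obtain ⟨x, hx⟩ := List.length_eq_one_iff.mp h1
    subst hx
    have hmx : pvKeys.contains x = true := hmem
    have hmem' : x ∈ pvKeys := List.contains_iff_mem.mp hmx
    rw [pvSolve]
    simp [hmx, hmem', List.count_singleton]
    intro a _
    by_cases hax : a = x
    · subst hax; simp
    · simp [hax, Ne.symm hax]
  | case3 seg h h1 c hmem =>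
    obtain ⟨x, hx⟩ := List.length_eq_one_iff.mp h1
    subst hx
    have hmem' : x ∉ pvKeys := by simpa using hmem
    have hmx : pvKeys.contains x = false := by
      simp [List.contains_iff_mem, hmem']
    rw [pvSolve]
    simp [hmx, hmem', List.count_singleton]
    have hz : List.map (fun k => if x = k then (1:Int) else 0) pvKeys
        = List.map (fun _ => (0:Int)) pvKeys := by
      apply List.map_congr_left
      intro a ha
      have hxa : ¬ x = a := fun hh => hmem' (hh ▸ ha)
      simp [hxa]
    rw [hz]
    decide
  | case4 seg h h1 mid ih1 ih2 =>
    have ih1' : pvSolve (seg.take (seg.length / 2))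
        = (List.filter (fun c => !pvKeys.contains c) (seg.take (seg.length / 2)),
           pvKeys.map fun k => (List.count k (seg.take (seg.length / 2)) : Int)) := ih1
    have ih2' : pvSolve (seg.drop (seg.length / 2))
        = (List.filter (fun c => !pvKeys.contains c) (seg.drop (seg.length / 2)),
           pvKeys.map fun k => (List.count k (seg.drop (seg.length / 2)) : Int)) := ih2
    rw [pvSolve, dif_neg h, dif_neg h1]
    show ((pvSolve (seg.take (seg.length / 2))).1 ++ (pvSolve (seg.drop (seg.length / 2))).1,
          List.zipWith (· + ·) (pvSolve (seg.take (seg.length / 2))).2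
            (pvSolve (seg.drop (seg.length / 2))).2)
        = (seg.filter (fun c => !(pvKeys.contains c)),
           pvKeys.map (fun k => (List.count k seg : Int)))
    rw [ih1', ih2']
    simp only [pv_zipWith_map]
    refine Prod.ext ?_ ?_
    · simp only
      rw [← List.filter_append, List.take_append_drop]
    · simp only
      apply List.map_congr_left
      intro k _
      have hcnt := List.count_append (l₁ := seg.take (seg.length / 2)) (l₂ := seg.drop (seg.length / 2)) (a := k)
      rw [List.take_append_drop] at hcnt
      rw [hcnt]
      push_cast
      ring

-- 3 ≤ running min ↔ every element is ≥ 3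
theorem pv_le_foldl_min (x : Int) (t : List Int) :
    (3 ≤ t.foldl min x) ↔ (3 ≤ x ∧ ∀ y ∈ t, 3 ≤ y) := by
  induction t generalizing x with
  | nil => simp
  | cons y t ih =>
    simp only [List.foldl_cons, ih, le_min_iff, List.mem_cons]
    constructor
    · rintro ⟨⟨hx, hy⟩, hrest⟩
      exact ⟨hx, fun z hz => hz.elim (fun h => h ▸ hy) (hrest z)⟩
    · rintro ⟨hx, hall⟩
      exact ⟨⟨hx, hall y (Or.inl rfl)⟩, fun z hz => hall z (Or.inr hz)⟩

-- zip of a list with its map is the map of pairs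
theorem pv_zip_map (f : String → Int) (l : List String) :
    List.zip l (l.map f) = l.map (fun k => (k, f k)) := by
  induction l with
  | nil => rfl
  | cons x t ih => simp [ih]

-- B's tail: validation + dict building, in A's if-all form
theorem pv_alt_eq (no_pair : List String) :
    check_txt_alt no_pair
      = if (pvKeys.map (fun k => (k, (List.count k no_pair : Int)))).all (fun p => 3 ≤ p.2)
        then ([] ++ no_pair.filter (fun c => !(pvKeys.contains c)),
              some (pvKeys.map (fun k => (k, (List.count k no_pair : Int)))))
        else ([] ++ no_pair.filter (fun c => !(pvKeys.contains c)), none) := by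
  unfold check_txt_alt
  simp only [pvSolve_eq, pv_zip_map]
  have hitems : (List.foldl (fun d q => d.insert q.1 q.2) PySem.Dict.empty
        (pvKeys.map (fun k => (k, (List.count k no_pair : Int))))).items
      = pvKeys.map (fun k => (k, (List.count k no_pair : Int))) := by
    rw [PySem.Dict.items_foldl_insert_fresh (k := Prod.fst) (v := Prod.snd)]
    · simp [Function.comp_def, PySem.Dict.empty, PySem.Dict.items]
    · simp
    · simpa [Function.comp] using (show pvKeys.Nodup by decide)
  rw [hitems]
  have hmap : pvKeys.map (fun k => (List.count k no_pair : Int))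
      = (List.count "E" no_pair : Int) ::
        (["S", "W", "N", "Ch", "Fa", "By"].map (fun k => (List.count k no_pair : Int))) := rfl
  simp only [hmap, PySem.List.min?_id_cons]
  simp only [List.nil_append]
  have hiff : (3 ≤ (["S", "W", "N", "Ch", "Fa", "By"].map
          (fun k => (List.count k no_pair : Int))).foldl min (List.count "E" no_pair : Int))
      ↔ ((pvKeys.map (fun k => (k, (List.count k no_pair : Int)))).all
          (fun p => 3 ≤ p.2) = true) := by
    rw [pv_le_foldl_min]
    simp [pvKeys]
  split_ifs with h1 h2 h3
  all_goals first
    | rfl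
    | (exact absurd (hiff.mp h1) (by assumption))
    | (exact absurd (hiff.mpr (by assumption)) h1)

-- ===== VERDICT (by name: the statement is the Claim_ definition above) =====
theorem check_txt_spec : Claim_equal_check_txt := by
  intro no_pair _
  unfold Spec_check_txt check_txt
  obtain ⟨_, _, h3⟩ := pv_fold_inv no_pair pvTxtMap0 [] (by decide)
  rw [pv_validate_eq, pv_items_eq, h3]
  exact (pv_alt_eq no_pair).symm
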